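-- pv_equiv track=rewrite | github.com/teliseo/twinkly-tree-helper | twinkly_tree_helper.py | _suffix_letters
-- ===== SOURCE A (Python) =====
-- from typing import Dict, Iterable, List, Optional, Sequence, Tuple
--
-- def _suffix_letters(n: int) -> List[str]:
--     # 'a'..'z', then 'aa'.. (basic spreadsheet-style)
--     out: List[str] = []
--     i = 0
--     while len(out) < n:
--         x = i
--         s = ""
--         while True:
--             s = chr(ord("a") + (x % 26)) + s
--             x = x // 26 - 1
--             if x < 0:
--                 break
--         out.append(s)
--         i += 1
--     return out
-- ===== SOURCE B (Python) =====
-- from typing import List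
--
-- def _bump(ds: List[int]) -> List[int]:
--     # increment an odometer of base-26 digits (least-significant first, 0..25)
--     if not ds:
--         return [0]
--     if ds[0] == 25:
--         return [0] + _bump(ds[1:])
--     return [ds[0] + 1] + ds[1:]
--
-- def _suffix_letters(n: int) -> List[str]:
--     # odometer: keep the current label's digits and increment once per output
--     out: List[str] = []
--     cur: List[int] = []
--     while len(out) < n:
--         cur = _bump(cur)
--         out.append("".join(chr(97 + d) for d in reversed(cur)))
--     return out
-- ===== Notes on version B (the rewrite author's own statement) =====
-- stated objective: alternative
-- what changed: B maintains the current label as an odometer of base-26 digits and increments it once per output, instead of A's per-index inner loop converting each i to bijective base-26 from scratch.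
import Mathlib
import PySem

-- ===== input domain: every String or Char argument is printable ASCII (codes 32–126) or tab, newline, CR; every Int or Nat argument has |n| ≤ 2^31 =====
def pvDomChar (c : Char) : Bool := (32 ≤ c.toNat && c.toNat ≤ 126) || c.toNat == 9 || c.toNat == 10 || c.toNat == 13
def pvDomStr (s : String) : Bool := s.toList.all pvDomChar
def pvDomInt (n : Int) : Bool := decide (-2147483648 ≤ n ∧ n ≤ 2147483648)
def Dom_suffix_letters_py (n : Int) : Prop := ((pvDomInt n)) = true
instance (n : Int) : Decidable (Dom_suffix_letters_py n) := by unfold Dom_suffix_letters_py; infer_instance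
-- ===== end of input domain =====

-- B replaces A's per-index base-26 conversion by an odometer that increments the current
-- label once per output (objective: alternative decomposition, same cost).

-- chr(97 + d), shared char conversion appearing in both Pythons
def pvCh (d : Nat) : Char := Char.ofNat (97 + d)

-- ===== PORT A =====
-- inner 'while True' loop of A: prepend digit chars, x = x // 26 - 1, break when x < 0
def suffixInnerA (x : Int) (s : List Char) : List Char :=
  let s' := pvCh (PySem.Int.mod x 26).toNat :: s
  let x' := PySem.Int.floordiv x 26 - 1
  if _h : x' < 0 then s' else suffixInnerA x' s'
termination_by x.toNat
decreasing_by
  have h1 : (1 : Int) ≤ PySem.Int.floordiv x 26 := by omega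
  have h26 : (26 : Int) ≤ x := by
    have := (PySem.Int.le_floordiv_iff_mul_le (a := x) (b := 26) (q := 1) (by omega)).mp h1
    omega
  have hlt : PySem.Int.floordiv x 26 < x :=
    (PySem.Int.floordiv_lt_iff_lt_mul (a := x) (b := 26) (q := x) (by omega)).mpr (by nlinarith)
  omega

-- outer 'while len(out) < n' loop of A
def suffixOuterA (n : Int) (i : Int) (out : List String) : List String :=
  if (out.length : Int) < n then
    suffixOuterA n (i + 1) (out ++ [String.mk (suffixInnerA i [])])
  else out
termination_by (n - out.length).toNat
decreasing_by simp [List.length_append]; omega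

def suffix_letters_py (n : Int) : List String := suffixOuterA n 0 []

-- ===== PORT B =====
-- _bump: increment a least-significant-first odometer of base-26 digits
def pvBump : List Nat → List Nat
  | [] => [0]
  | d :: ds => if d = 25 then 0 :: pvBump ds else (d + 1) :: ds

-- outer loop of B: bump the odometer, append its rendering
def suffixOuterB (n : Int) (cur : List Nat) (out : List String) : List String :=
  if (out.length : Int) < n then
    let cur' := pvBump cur
    suffixOuterB n cur' (out ++ [String.mk (cur'.reverse.map pvCh)])
  else out
termination_by (n - out.length).toNat
decreasing_by simp [List.length_append]; omega

def suffix_letters_py_alt (n : Int) : List String := suffixOuterB n [] []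

-- ===== PRECONDITION & SPEC =====
def Spec_suffix_letters_py (n : Int) (out : List String) : Prop := out = suffix_letters_py_alt n
instance (n : Int) (out : List String) : Decidable (Spec_suffix_letters_py n out) := by unfold Spec_suffix_letters_py; infer_instance

-- ===== CLAIM (what is proved, stated in full; the proofs are below) =====
def Claim_equal_suffix_letters_py : Prop := ∀ (n : Int), Dom_suffix_letters_py n → Spec_suffix_letters_py n (suffix_letters_py n)

-- ===== LEMMAS AND PROOFS =====

-- mathematical digit list of label i, least-significant first (bijective base 26, offsets 0..25)
def pvDigits (i : Nat) : List Nat :=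
  i % 26 :: (if i / 26 = 0 then [] else pvDigits (i / 26 - 1))
termination_by i
decreasing_by omega

-- the odometer state before producing label i: [] for i = 0, else digits of i-1
def pvPrev : Nat → List Nat
  | 0 => []
  | i + 1 => pvDigits i

theorem suffixInnerA_eq (i : Nat) (s : List Char) :
    suffixInnerA (i : Int) s = ((pvDigits i).map pvCh).reverse ++ s := by
  induction i using Nat.strong_induction_on generalizing s with
  | _ i ih =>
    have hm : PySem.Int.mod (i : Int) 26 = ((i % 26 : Nat) : Int) := by
      rw [PySem.Int.mod_eq_emod_of_pos (by omega : (0:Int) < 26)]; omega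
    have hf : PySem.Int.floordiv (i : Int) 26 = ((i / 26 : Nat) : Int) := by
      rw [PySem.Int.floordiv_eq_ediv_of_pos (by omega : (0:Int) < 26)]; omega
    rw [suffixInnerA, pvDigits]
    simp only [hm, hf, Int.toNat_natCast]
    by_cases h0 : i / 26 = 0
    · simp [h0]
    · have hne : ¬ ((i / 26 : Nat) : Int) - 1 < 0 := by omega
      have hc : ((i / 26 : Nat) : Int) - 1 = ((i / 26 - 1 : Nat) : Int) := by omega
      rw [dif_neg hne]
      rw [hc, ih (i / 26 - 1) (by omega)]
      simp [h0, List.append_assoc]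

theorem pvBump_digits (i : Nat) : pvBump (pvDigits i) = pvDigits (i + 1) := by
  induction i using Nat.strong_induction_on with
  | _ i ih =>
    conv_rhs => rw [pvDigits]
    conv_lhs => rw [pvDigits]
    by_cases h : i % 26 = 25
    · have h1 : (i + 1) % 26 = 0 := by omega
      have h2 : (i + 1) / 26 = i / 26 + 1 := by omega
      simp only [pvBump, h, h1, h2]
      by_cases h0 : i / 26 = 0
      · simp [h0, pvBump, pvDigits]
      · have hi : i / 26 - 1 < i := by omega
        rw [if_neg h0, ih (i / 26 - 1) hi]
        have : i / 26 - 1 + 1 = i / 26 := by omega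
        simp [this]
    · have h1 : (i + 1) % 26 = i % 26 + 1 := by omega
      have h2 : (i + 1) / 26 = i / 26 := by omega
      simp [pvBump, h, h1, h2]

theorem pvBump_prev (i : Nat) : pvBump (pvPrev i) = pvDigits i := by
  cases i with
  | zero => simp [pvPrev, pvBump, pvDigits]
  | succ j => exact pvBump_digits j

theorem outer_eq (k : Nat) : ∀ (n : Int) (i : Nat) (out : List String),
    (n - out.length).toNat = k →
    suffixOuterA n (i : Int) out = suffixOuterB n (pvPrev i) out := by
  induction k with
  | zero =>
    intro n i out hk
    rw [suffixOuterA, suffixOuterB]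
    have : ¬ ((out.length : Int) < n) := by omega
    simp [this]
  | succ k ih =>
    intro n i out hk
    rw [suffixOuterA, suffixOuterB]
    by_cases h : (out.length : Int) < n
    · simp only [if_pos h]
      have hs : String.mk (suffixInnerA (i : Int) []) =
          String.mk ((pvBump (pvPrev i)).reverse.map pvCh) := by
        rw [suffixInnerA_eq, pvBump_prev, List.map_reverse, List.append_nil]
      rw [hs]
      have hcast : (i : Int) + 1 = ((i + 1 : Nat) : Int) := by omega
      have hprev : pvBump (pvPrev i) = pvPrev (i + 1) := by
        rw [pvBump_prev]; rfl
      rw [hcast, hprev]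
      exact ih n (i + 1) _ (by simp [List.length_append]; omega)
    · simp [h]

-- ===== VERDICT (by name: the statement is the Claim_ definition above) =====
theorem suffix_letters_py_spec : Claim_equal_suffix_letters_py := by
  intro n _
  unfold Spec_suffix_letters_py suffix_letters_py suffix_letters_py_alt
  have h := outer_eq (n - ([] : List String).length).toNat n 0 [] rfl
  simpa [pvPrev] using h
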